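-- pv_equiv track=rewrite | github.com/EcosystemNetwork/xLever | server/api/routes/news.py | _classify_econ_event
-- ===== SOURCE A (Python) =====
-- def _classify_econ_event(name: str) -> str:
--     """Classify an economic event name into our known types."""
--     n = name.lower()
--     if any(k in n for k in ["fomc", "fed funds", "interest rate decision", "federal reserve"]):
--         return "fomc"
--     if any(k in n for k in ["cpi", "consumer price", "inflation"]):
--         return "cpi"
--     if any(k in n for k in ["nonfarm", "payroll", "employment", "jobs report", "unemployment"]):
--         return "jobs"
--     if any(k in n for k in ["gdp", "gross domestic"]):
--         return "gdp"
--     if any(k in n for k in ["earnings", "quarterly results"]):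
--         return "earnings"
--     if any(k in n for k in ["pmi", "manufacturing", "ism"]):
--         return "pmi"
--     if any(k in n for k in ["retail sales"]):
--         return "retail"
--     return "other"
-- ===== SOURCE B (Python) =====
-- # One left-to-right scan of the lowercased name with hand-rolled multi-pattern
-- # prefix matching at each position, keeping the best (lowest) priority seen.
-- _KEYWORD_PRIORITY = [
--     ("fomc", 0), ("fed funds", 0), ("interest rate decision", 0), ("federal reserve", 0),
--     ("cpi", 1), ("consumer price", 1), ("inflation", 1),
--     ("nonfarm", 2), ("payroll", 2), ("employment", 2), ("jobs report", 2), ("unemployment", 2),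
--     ("gdp", 3), ("gross domestic", 3),
--     ("earnings", 4), ("quarterly results", 4),
--     ("pmi", 5), ("manufacturing", 5), ("ism", 5),
--     ("retail sales", 6),
-- ]
-- _LABELS = ["fomc", "cpi", "jobs", "gdp", "earnings", "pmi", "retail", "other"]
--
--
-- def _classify_econ_event(name: str) -> str:
--     """Classify an economic event name into our known types."""
--     n = name.lower()
--     best = 7
--     for i in range(len(n)):
--         for kw, prio in _KEYWORD_PRIORITY:
--             if prio < best and n.startswith(kw, i):
--                 best = prio
--     return _LABELS[best]
-- ===== Notes on version B (the rewrite author's own statement) =====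
-- stated objective: alternative
-- what changed: Replaced A's branch-by-branch per-keyword substring membership tests by a single left-to-right scan of the lowercased name that does multi-pattern prefix matching at every position while keeping the best (lowest) matched priority, indexing a label table at the end.
import Mathlib
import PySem

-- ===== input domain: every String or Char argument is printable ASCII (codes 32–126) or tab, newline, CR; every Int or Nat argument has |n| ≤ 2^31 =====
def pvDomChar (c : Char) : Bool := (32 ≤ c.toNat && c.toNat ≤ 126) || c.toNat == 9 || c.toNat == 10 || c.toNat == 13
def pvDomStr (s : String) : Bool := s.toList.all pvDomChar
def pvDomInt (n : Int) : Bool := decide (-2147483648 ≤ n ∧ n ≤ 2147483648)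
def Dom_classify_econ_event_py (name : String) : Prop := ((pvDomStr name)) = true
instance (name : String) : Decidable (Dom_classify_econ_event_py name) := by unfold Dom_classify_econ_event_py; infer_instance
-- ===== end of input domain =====

-- B replaces A's per-keyword substring membership tests (branch by branch) by one
-- left-to-right scan of the lowercased name doing multi-pattern prefix matching at each
-- position while keeping the best (lowest) matched priority (alternative algorithm; same result).

-- ===== PORT A =====
def classify_econ_event_py (name : String) : String :=
  let n := PySem.Str.lower name
  if ["fomc", "fed funds", "interest rate decision", "federal reserve"].any (fun k => PySem.Str.isIn k n) then "fomc"
  else if ["cpi", "consumer price", "inflation"].any (fun k => PySem.Str.isIn k n) then "cpi"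
  else if ["nonfarm", "payroll", "employment", "jobs report", "unemployment"].any (fun k => PySem.Str.isIn k n) then "jobs"
  else if ["gdp", "gross domestic"].any (fun k => PySem.Str.isIn k n) then "gdp"
  else if ["earnings", "quarterly results"].any (fun k => PySem.Str.isIn k n) then "earnings"
  else if ["pmi", "manufacturing", "ism"].any (fun k => PySem.Str.isIn k n) then "pmi"
  else if ["retail sales"].any (fun k => PySem.Str.isIn k n) then "retail"
  else "other"

-- ===== PORT B =====
-- _KEYWORD_PRIORITY, keywords as char lists (n.startswith(kw, i) = kw.isPrefixOf (n.drop i))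
def pvKws : List (List Char × Nat) :=
  [("fomc".toList, 0), ("fed funds".toList, 0), ("interest rate decision".toList, 0), ("federal reserve".toList, 0),
   ("cpi".toList, 1), ("consumer price".toList, 1), ("inflation".toList, 1),
   ("nonfarm".toList, 2), ("payroll".toList, 2), ("employment".toList, 2), ("jobs report".toList, 2), ("unemployment".toList, 2),
   ("gdp".toList, 3), ("gross domestic".toList, 3),
   ("earnings".toList, 4), ("quarterly results".toList, 4),
   ("pmi".toList, 5), ("manufacturing".toList, 5), ("ism".toList, 5),
   ("retail sales".toList, 6)]

def pvLabels : List String :=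
  ["fomc", "cpi", "jobs", "gdp", "earnings", "pmi", "retail", "other"]

-- the inner `for kw, prio in _KEYWORD_PRIORITY` loop at one position (suffix of n)
def pvStep (kws : List (List Char × Nat)) (suf : List Char) (best : Nat) : Nat :=
  kws.foldl (fun b kwp => if kwp.2 < b ∧ kwp.1.isPrefixOf suf then kwp.2 else b) best

-- the outer `for i in range(len(n))` loop, position i represented by the suffix n.drop i
def pvScan (kws : List (List Char × Nat)) : List Char → Nat → Nat
  | [], best => best
  | c :: rest, best => pvScan kws rest (pvStep kws (c :: rest) best)

def classify_econ_event_py_alt (name : String) : String :=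
  let n := (PySem.Str.lower name).toList
  -- `_LABELS[best]`: best is always ≤ 7, where Python's indexing equals getD
  pvLabels.getD (pvScan pvKws n 7) "other"

-- ===== PRECONDITION & SPEC =====
def Spec_classify_econ_event_py (name : String) (out : String) : Prop := out = classify_econ_event_py_alt name
instance (name : String) (out : String) : Decidable (Spec_classify_econ_event_py name out) := by unfold Spec_classify_econ_event_py; infer_instance

-- ===== CLAIM (what is proved, stated in full; the proofs are below) =====
def Claim_equal_classify_econ_event_py : Prop := ∀ (name : String), Dom_classify_econ_event_py name → Spec_classify_econ_event_py name (classify_econ_event_py name)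

-- ===== LEMMAS AND PROOFS =====

-- G: fold over the keyword table taking min with the priority of every keyword occurring anywhere in cs
def pvG (kws : List (List Char × Nat)) (cs : List Char) (best : Nat) : Nat :=
  kws.foldl (fun b kwp => if PySem.Chars.isIn kwp.1 cs = true then min b kwp.2 else b) best

theorem pvStep_eq_fold_min (kws : List (List Char × Nat)) (suf : List Char) (best : Nat) :
    pvStep kws suf best
      = kws.foldl (fun b kwp => if kwp.1.isPrefixOf suf = true then min b kwp.2 else b) best := by
  induction kws generalizing best with
  | nil => rfl
  | cons e t ih =>
      have h1 : (if e.2 < best ∧ e.1.isPrefixOf suf then e.2 else best)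
          = (if e.1.isPrefixOf suf = true then min best e.2 else best) := by
        by_cases hp : e.1.isPrefixOf suf = true
        · simp only [hp, and_true, if_true]
          split_ifs <;> omega
        · simp [hp]
      calc pvStep (e :: t) suf best
          = pvStep t suf (if e.2 < best ∧ e.1.isPrefixOf suf then e.2 else best) := rfl
        _ = t.foldl (fun b kwp => if kwp.1.isPrefixOf suf = true then min b kwp.2 else b)
              (if e.1.isPrefixOf suf = true then min best e.2 else best) := by rw [ih, h1]
        _ = (e :: t).foldl (fun b kwp => if kwp.1.isPrefixOf suf = true then min b kwp.2 else b) best := rfl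

theorem pvFoldPre_min (kws : List (List Char × Nat)) (suf : List Char) (x c : Nat) :
    kws.foldl (fun b kwp => if kwp.1.isPrefixOf suf = true then min b kwp.2 else b) (min x c)
      = min (kws.foldl (fun b kwp => if kwp.1.isPrefixOf suf = true then min b kwp.2 else b) x) c := by
  induction kws generalizing x with
  | nil => rfl
  | cons e t ih =>
      simp only [List.foldl_cons]
      split_ifs
      · rw [← ih]; congr 1; omega
      · exact ih x

theorem pvChars_isIn_cons (kw : List Char) (c : Char) (rest : List Char) :
    PySem.Chars.isIn kw (c :: rest) = (kw.isPrefixOf (c :: rest) || PySem.Chars.isIn kw rest) := by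
  by_cases h : kw <:+: (c :: rest)
  · rw [(PySem.Chars.isIn_iff_infix kw (c :: rest)).2 h]
    rcases List.infix_cons_iff.1 h with hp | hi
    · simp [List.isPrefixOf_iff_prefix.2 hp]
    · simp [(PySem.Chars.isIn_iff_infix kw rest).2 hi]
  · rw [(PySem.Chars.isIn_eq_false_iff kw (c :: rest)).2 h]
    have h1 : ¬ kw <+: (c :: rest) := fun hp => h (List.infix_cons_iff.2 (Or.inl hp))
    have h2 : ¬ kw <:+: rest := fun hi => h (List.infix_cons_iff.2 (Or.inr hi))
    have hb : kw.isPrefixOf (c :: rest) = false := by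
      cases hx : kw.isPrefixOf (c :: rest)
      · rfl
      · exact absurd (List.isPrefixOf_iff_prefix.1 hx) h1
    rw [hb, (PySem.Chars.isIn_eq_false_iff kw rest).2 h2]
    rfl

theorem pvChars_isIn_nil (kw : List Char) (h : kw ≠ []) : PySem.Chars.isIn kw [] = false :=
  (PySem.Chars.isIn_eq_false_iff kw []).2 (fun hi => h (List.eq_nil_of_infix_nil hi))

-- pushing one position step through the min-over-keywords fold
theorem pvG_foldpre (kws : List (List Char × Nat)) (c : Char) (rest : List Char) (best : Nat) :
    pvG kws rest
      (kws.foldl (fun b kwp => if kwp.1.isPrefixOf (c :: rest) = true then min b kwp.2 else b) best)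
      = pvG kws (c :: rest) best := by
  induction kws generalizing best with
  | nil => rfl
  | cons e t ih =>
      have hcomb : (if PySem.Chars.isIn e.1 rest = true then
              min (if e.1.isPrefixOf (c :: rest) = true then min best e.2 else best) e.2
            else (if e.1.isPrefixOf (c :: rest) = true then min best e.2 else best))
          = (if PySem.Chars.isIn e.1 (c :: rest) = true then min best e.2 else best) := by
        rw [pvChars_isIn_cons e.1 c rest]
        by_cases hp : e.1.isPrefixOf (c :: rest) = true <;>
          by_cases hr : PySem.Chars.isIn e.1 rest = true <;>
          simp [hp, hr]
      calc pvG (e :: t) rest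
              ((e :: t).foldl (fun b kwp => if kwp.1.isPrefixOf (c :: rest) = true then min b kwp.2 else b) best)
          = pvG t rest (if PySem.Chars.isIn e.1 rest = true then
               min (t.foldl (fun b kwp => if kwp.1.isPrefixOf (c :: rest) = true then min b kwp.2 else b)
                     (if e.1.isPrefixOf (c :: rest) = true then min best e.2 else best)) e.2
             else t.foldl (fun b kwp => if kwp.1.isPrefixOf (c :: rest) = true then min b kwp.2 else b)
                     (if e.1.isPrefixOf (c :: rest) = true then min best e.2 else best)) := by
            simp only [pvG, List.foldl_cons]
        _ = pvG t rest
              (t.foldl (fun b kwp => if kwp.1.isPrefixOf (c :: rest) = true then min b kwp.2 else b)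
                (if PySem.Chars.isIn e.1 rest = true then
                   min (if e.1.isPrefixOf (c :: rest) = true then min best e.2 else best) e.2
                 else (if e.1.isPrefixOf (c :: rest) = true then min best e.2 else best))) := by
            by_cases hr : PySem.Chars.isIn e.1 rest = true
            · simp only [if_pos hr]
              rw [pvFoldPre_min]
            · simp only [if_neg hr]
        _ = pvG t (c :: rest)
              (if PySem.Chars.isIn e.1 (c :: rest) = true then min best e.2 else best) := by
            rw [hcomb, ih]
        _ = pvG (e :: t) (c :: rest) best := rfl

-- main characterization: the position scan equals the min-over-keywords fold
theorem pvScan_eq_G (kws : List (List Char × Nat)) (hne : ∀ kwp ∈ kws, kwp.1 ≠ ([] : List Char))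
    (cs : List Char) (best : Nat) : pvScan kws cs best = pvG kws cs best := by
  induction cs generalizing best with
  | nil =>
      show best = pvG kws [] best
      induction kws with
      | nil => rfl
      | cons e t iht =>
          simp only [pvG, List.foldl_cons, pvChars_isIn_nil e.1 (hne e (by simp))]
          simpa using iht (fun kwp h => hne kwp (by simp [h]))
  | cons c rest ih =>
      show pvScan kws rest (pvStep kws (c :: rest) best) = pvG kws (c :: rest) best
      rw [ih, pvStep_eq_fold_min, pvG_foldpre]

-- one same-priority group inside the fold behaves like A's `any` test
theorem pvG_group (cs : List Char) (p : Nat) (ks : List (List Char)) (b : Nat) :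
    (ks.map (fun k => (k, p))).foldl (fun b kwp => if PySem.Chars.isIn kwp.1 cs = true then min b kwp.2 else b) b
      = if ks.any (fun k => PySem.Chars.isIn k cs) = true then min b p else b := by
  induction ks generalizing b with
  | nil => simp
  | cons k t ih =>
      simp only [List.map_cons, List.foldl_cons, List.any_cons]
      by_cases h : PySem.Chars.isIn k cs = true
      · simp only [h, if_true, Bool.true_or, if_true, ih]
        split_ifs <;> omega
      · simp only [h, ih]
        simp


theorem pvKws_groups : pvKws =
    (["fomc".toList, "fed funds".toList, "interest rate decision".toList, "federal reserve".toList].map (fun k => (k, 0)))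
    ++ (["cpi".toList, "consumer price".toList, "inflation".toList].map (fun k => (k, 1)))
    ++ (["nonfarm".toList, "payroll".toList, "employment".toList, "jobs report".toList, "unemployment".toList].map (fun k => (k, 2)))
    ++ (["gdp".toList, "gross domestic".toList].map (fun k => (k, 3)))
    ++ (["earnings".toList, "quarterly results".toList].map (fun k => (k, 4)))
    ++ (["pmi".toList, "manufacturing".toList, "ism".toList].map (fun k => (k, 5)))
    ++ (["retail sales".toList].map (fun k => (k, 6))) := by rfl

-- ===== VERDICT (by name: the statement is the Claim_ definition above) =====
set_option maxHeartbeats 2000000 in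
theorem classify_econ_event_py_spec : Claim_equal_classify_econ_event_py := by
  intro name _
  unfold Spec_classify_econ_event_py classify_econ_event_py classify_econ_event_py_alt
  dsimp only
  have hne : ∀ kwp ∈ pvKws, kwp.1 ≠ ([] : List Char) := by decide
  rw [pvScan_eq_G pvKws hne, pvKws_groups]
  unfold pvG
  rw [List.foldl_append, List.foldl_append, List.foldl_append, List.foldl_append,
      List.foldl_append, List.foldl_append]
  rw [pvG_group, pvG_group, pvG_group, pvG_group, pvG_group, pvG_group, pvG_group]
  simp only [PySem.Str.isIn_eq, PySem.Str.toList_lower, List.any_cons, List.any_nil,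
    Bool.or_false]
  split_ifs <;> rfl
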